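-- pv_equiv track=rewrite | github.com/rdrapeau/aoc | 2024/15/main.py | push_line_of_boxes
-- ===== SOURCE A (Python) =====
-- BOXES = {'O', '[', ']'}
--
-- WALL = '#'
--
-- def get_next(cur, direction, negate=False):
-- 	return (cur[0] + direction[0], cur[1] + direction[1]) if not negate else (cur[0] - direction[0], cur[1] - direction[1])
--
-- def push_line_of_boxes(grid, new_pos, direction):
-- 	cur_pos = new_pos
-- 	while grid[cur_pos[0]][cur_pos[1]] != WALL and grid[cur_pos[0]][cur_pos[1]] in BOXES:
-- 		cur_pos = get_next(cur_pos, direction)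
--
-- 	if grid[cur_pos[0]][cur_pos[1]] == WALL:
-- 		return False
--
-- 	while cur_pos != new_pos:
-- 		next_pos = get_next(cur_pos, direction, negate=True)
-- 		grid[cur_pos[0]][cur_pos[1]], grid[next_pos[0]][next_pos[1]] = grid[next_pos[0]][next_pos[1]], grid[cur_pos[0]][cur_pos[1]]
-- 		cur_pos = next_pos
--
-- 	return True
-- ===== SOURCE B (Python) =====
-- BOXES = {'O', '[', ']'}
--
-- WALL = '#'
--
-- def push_line_of_boxes(grid, new_pos, direction):
-- 	# Recursive decomposition: one recursive pass fuses the scan and the shift.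
-- 	# Push the tail of the line first (call stack), then drop the current box
-- 	# into the freed next cell on the way back out of the recursion.
-- 	r, c = new_pos
-- 	cell = grid[r][c]
-- 	if cell == WALL:
-- 		return False
-- 	if cell not in BOXES:
-- 		return True
-- 	nxt = (r + direction[0], c + direction[1])
-- 	if not push_line_of_boxes(grid, nxt, direction):
-- 		return False
-- 	grid[r][c], grid[nxt[0]][nxt[1]] = grid[nxt[0]][nxt[1]], cell
-- 	return True
-- ===== Notes on version B (the rewrite author's own statement) =====
-- stated objective: alternative
-- what changed: B is recursive: a single recursive pass pushes the tail of the box line first and performs each swap on the way back out of the call stack, replacing A's two staged iterative loops (forward scan, then backward swap walk); return value and grid mutation are identical.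
import Mathlib
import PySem

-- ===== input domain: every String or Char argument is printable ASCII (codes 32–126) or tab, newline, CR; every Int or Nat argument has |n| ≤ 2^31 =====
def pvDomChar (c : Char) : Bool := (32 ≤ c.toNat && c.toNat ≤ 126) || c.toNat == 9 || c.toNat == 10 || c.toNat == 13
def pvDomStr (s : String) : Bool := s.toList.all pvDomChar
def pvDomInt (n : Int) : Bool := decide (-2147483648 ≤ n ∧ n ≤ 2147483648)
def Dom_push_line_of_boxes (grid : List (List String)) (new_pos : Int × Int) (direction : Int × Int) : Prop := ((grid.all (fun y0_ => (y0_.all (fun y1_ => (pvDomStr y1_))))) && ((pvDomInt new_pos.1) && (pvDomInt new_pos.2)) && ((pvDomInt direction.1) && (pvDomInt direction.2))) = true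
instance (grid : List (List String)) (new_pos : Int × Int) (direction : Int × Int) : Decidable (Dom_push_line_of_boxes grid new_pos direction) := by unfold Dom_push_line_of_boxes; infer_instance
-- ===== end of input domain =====

-- B replaces A's two staged loops (forward scan, then backward swap walk) by one
-- recursive pass that swaps on the way out of the call stack (objective: alternative
-- decomposition, same O(n) cost).  Both Pythons mutate `grid` identically in place;
-- the equivalence proved here is about the RETURN value only (mutation not modeled).

-- ===== PORT A =====
-- grid[p.1][p.2] with Python negative-index semantics
def pvCellA (grid : List (List String)) (p : Int × Int) : Option String :=
  (PySem.List.pyGet? grid p.1).bind fun row => PySem.List.pyGet? row p.2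

-- get_next(cur, direction)
def pvStepA (cur direction : Int × Int) : Int × Int :=
  (cur.1 + direction.1, cur.2 + direction.2)

-- fuel bound: under Pre_ the scan stops within this many steps (see Pre_ comment)
def pvFuel (grid : List (List String)) : Nat :=
  2 * grid.length + 2 * grid.foldl (fun m r => max m r.length) 0 + 1

-- A's first while loop: advance while the cell is (≠ WALL and) in BOXES
def pvLoopA (grid : List (List String)) (direction : Int × Int) :
    Nat → (Int × Int) → Int × Int
  | 0, cur => cur
  | fuel + 1, cur =>
    match pvCellA grid cur with
    | some s =>
        if s ≠ "#" ∧ (s = "O" ∨ s = "[" ∨ s = "]") then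
          pvLoopA grid direction fuel (pvStepA cur direction)
        else cur
    | none => cur

-- A's second while loop only swaps grid cells (mutation, not modeled); the return value
-- depends only on the cell at which the scan stopped.
def push_line_of_boxes (grid : List (List String)) (new_pos : Int × Int) (direction : Int × Int) : Bool :=
  let cur_pos := pvLoopA grid direction (pvFuel grid) new_pos
  if pvCellA grid cur_pos = some "#" then false else true

-- ===== PORT B =====
def pvBoxesB : List String := ["O", "[", "]"]

def pvCellB (grid : List (List String)) (p : Int × Int) : Option String :=
  (PySem.List.pyGet? grid p.1).bind fun row => PySem.List.pyGet? row p.2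

-- B's recursive function (the swap on the way back mutates only the grid, not modeled);
-- fuel makes the recursion total, a none cell corresponds to Python's IndexError
-- (outside Pre_) and is given A's stop-and-test value there.
def pvPushB (grid : List (List String)) (direction : Int × Int) :
    Nat → (Int × Int) → Bool
  | 0, pos => if pvCellB grid pos = some "#" then false else true
  | fuel + 1, pos =>
    match pvCellB grid pos with
    | some cell =>
        if cell = "#" then false
        else if pvBoxesB.contains cell then
          pvPushB grid direction fuel (pos.1 + direction.1, pos.2 + direction.2)
        else true
    | none => true

def push_line_of_boxes_alt (grid : List (List String)) (new_pos : Int × Int) (direction : Int × Int) : Bool :=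
  pvPushB grid direction (pvFuel grid) new_pos

-- ===== PRECONDITION & SPEC =====
def pvPosAt (new_pos direction : Int × Int) (i : Nat) : Int × Int :=
  (new_pos.1 + i * direction.1, new_pos.2 + i * direction.2)

def pvIsBoxCell (grid : List (List String)) (p : Int × Int) : Bool :=
  match pvCellA grid p with
  | some s => s == "O" || s == "[" || s == "]"
  | none => false

def pvIsStopCell (grid : List (List String)) (p : Int × Int) : Bool :=
  match pvCellA grid p with
  | some s => !(s == "O" || s == "[" || s == "]")
  | none => false

-- Pre_ = exactly the inputs on which the Python A returns: the scan from new_pos hits,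
-- after k in-range box cells, an in-range non-box cell (outside this A raises IndexError
-- or, for direction = (0,0) on a box, loops forever).  Any returning run has
-- k ≤ 2·rows + 2·maxRowLen + 1 = pvFuel grid, since the visited positions are distinct.
def Pre_push_line_of_boxes (grid : List (List String)) (new_pos : Int × Int) (direction : Int × Int) : Prop :=
  ∃ k : Nat, k ≤ pvFuel grid ∧
    (∀ i : Nat, i < k → pvIsBoxCell grid (pvPosAt new_pos direction i) = true) ∧
    pvIsStopCell grid (pvPosAt new_pos direction k) = true

instance (grid : List (List String)) (new_pos : Int × Int) (direction : Int × Int) : Decidable (Pre_push_line_of_boxes grid new_pos direction) := by unfold Pre_push_line_of_boxes; infer_instance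

def pvWitness_push_line_of_boxes : List (List String) × (Int × Int) × (Int × Int) :=
  ([[".", "O", "."]], (0, 1), (0, 1))

def Spec_push_line_of_boxes (grid : List (List String)) (new_pos : Int × Int) (direction : Int × Int) (out : Bool) : Prop := out = push_line_of_boxes_alt grid new_pos direction
instance (grid : List (List String)) (new_pos : Int × Int) (direction : Int × Int) (out : Bool) : Decidable (Spec_push_line_of_boxes grid new_pos direction out) := by unfold Spec_push_line_of_boxes; infer_instance

-- ===== CLAIM (what is proved, stated in full; the proofs are below) =====
def Claim_equal_push_line_of_boxes : Prop := ∀ (grid : List (List String)) (new_pos : Int × Int) (direction : Int × Int), Dom_push_line_of_boxes grid new_pos direction → Pre_push_line_of_boxes grid new_pos direction → Spec_push_line_of_boxes grid new_pos direction (push_line_of_boxes grid new_pos direction)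

-- ===== LEMMAS AND PROOFS =====
lemma pvCond_eq (s : String) :
    (pvBoxesB.contains s = true) ↔ (s ≠ "#" ∧ (s = "O" ∨ s = "[" ∨ s = "]")) := by
  simp only [pvBoxesB, List.contains_eq_mem, List.mem_cons, List.not_mem_nil, or_false,
    decide_eq_true_eq]
  constructor
  · rintro (h | h | h) <;> subst h <;> exact ⟨by decide, by tauto⟩
  · tauto

lemma pvPushB_eq_loopA (grid : List (List String)) (direction : Int × Int) :
    ∀ (fuel : Nat) (pos : Int × Int),
      pvPushB grid direction fuel pos =
        (if pvCellA grid (pvLoopA grid direction fuel pos) = some "#" then false else true) := by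
  intro fuel
  induction fuel with
  | zero => intro pos; rfl
  | succ n ih =>
    intro pos
    have hcell : pvCellB grid pos = pvCellA grid pos := rfl
    cases h : pvCellA grid pos with
    | none => simp [pvPushB, pvLoopA, hcell, h]
    | some s =>
      by_cases hw : s = "#"
      · subst hw
        simp [pvPushB, pvLoopA, hcell, h]
      · by_cases hb : pvBoxesB.contains s = true
        · have hc := (pvCond_eq s).1 hb
          have hmem : s ∈ pvBoxesB := by simpa using hb
          simp [pvPushB, pvLoopA, hcell, h, hw, hmem, hc, ih, pvStepA]
        · have hc : ¬ (s ≠ "#" ∧ (s = "O" ∨ s = "[" ∨ s = "]")) :=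
            fun hx => hb ((pvCond_eq s).2 hx)
          have hns : ¬ (s = "O" ∨ s = "[" ∨ s = "]") := fun hx => hc ⟨hw, hx⟩
          have hmem : s ∉ pvBoxesB := by simpa using hb
          simp [pvPushB, pvLoopA, hcell, h, hw, hmem, hns]

-- ===== VERDICT (by name: the statement is the Claim_ definition above) =====
theorem push_line_of_boxes_spec : Claim_equal_push_line_of_boxes := by
  intro grid new_pos direction _ _
  unfold Spec_push_line_of_boxes push_line_of_boxes push_line_of_boxes_alt
  exact (pvPushB_eq_loopA grid direction (pvFuel grid) new_pos).symm
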